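-- pv_equiv track=rewrite | github.com/springsky123/python-code | magicalnumber.py | magic_number
-- ===== SOURCE A (Python) =====
-- def magic_number(n):
--     while n>=10:
--         sum_of_digits = 0
--         while n>0:
--             sum_of_digits += n%10
--             n//=10
--         n = sum_of_digits
--     return n==1
-- ===== SOURCE B (Python) =====
-- def magic_number(n):
--     return n > 0 and n % 9 == 1
-- ===== Notes on version B (the rewrite author's own statement) =====
-- stated objective: simpler
-- what changed: Replaced the nested repeated digit-summing loops with the closed-form digital-root test (positivity plus remainder modulo nine).
import Mathlib
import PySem

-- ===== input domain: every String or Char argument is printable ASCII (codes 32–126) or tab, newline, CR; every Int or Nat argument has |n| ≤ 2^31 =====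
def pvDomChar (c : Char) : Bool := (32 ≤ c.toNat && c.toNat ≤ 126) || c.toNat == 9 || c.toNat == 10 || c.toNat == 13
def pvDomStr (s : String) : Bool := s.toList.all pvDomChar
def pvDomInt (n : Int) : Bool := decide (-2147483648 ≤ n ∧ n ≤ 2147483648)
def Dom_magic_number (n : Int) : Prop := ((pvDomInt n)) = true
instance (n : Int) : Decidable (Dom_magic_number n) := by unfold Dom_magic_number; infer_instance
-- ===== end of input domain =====

-- B replaces A's nested digit-summing loops with the closed-form digital-root test (simpler).


-- ===== PORT A =====
-- termination measure lemma for the inner loop (cited by the port's decreasing_by)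
theorem pvDec10 (n : Int) (h : 0 < n) : (PySem.Int.floordiv n 10).toNat < n.toNat := by
  rw [PySem.Int.floordiv_eq_ediv_of_pos (by omega : (0:Int) < 10)]; omega

-- inner loop: while n>0: sum_of_digits += n%10; n //= 10
def pvDigitSum (n s : Int) : Int :=
  if h : 0 < n then
    pvDigitSum (PySem.Int.floordiv n 10) (s + PySem.Int.mod n 10)
  else s
termination_by n.toNat
decreasing_by exact pvDec10 n h

-- pvDigitSum never shrinks its accumulator
theorem pvDigitSum_ge (n s : Int) : s ≤ pvDigitSum n s := by
  rw [pvDigitSum]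
  split
  · rename_i h
    have := pvDigitSum_ge (PySem.Int.floordiv n 10) (s + PySem.Int.mod n 10)
    have hm : 0 ≤ PySem.Int.mod n 10 := by
      rw [PySem.Int.mod_eq_emod_of_pos (by omega : (0:Int) < 10)]; omega
    omega
  · omega
termination_by n.toNat
decreasing_by
  rw [PySem.Int.floordiv_eq_ediv_of_pos (by omega : (0:Int) < 10)]
  omega

-- upper bound on the digit sum
theorem pvDigitSum_le (n s : Int) (hn : 0 ≤ n) : pvDigitSum n s ≤ s + n := by
  rw [pvDigitSum]
  split
  · rename_i h
    rw [PySem.Int.floordiv_eq_ediv_of_pos (by omega : (0:Int) < 10),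
        PySem.Int.mod_eq_emod_of_pos (by omega : (0:Int) < 10)]
    have := pvDigitSum_le (n / 10) (s + n % 10) (by omega)
    omega
  · omega
termination_by n.toNat
decreasing_by omega

-- for n ≥ 10 the digit sum is strictly smaller than n (termination of the outer loop)
theorem pvDigitSum_lt (n s : Int) (h : 10 ≤ n) : pvDigitSum n s < s + n := by
  rw [pvDigitSum]
  split
  · rw [PySem.Int.floordiv_eq_ediv_of_pos (by omega : (0:Int) < 10),
        PySem.Int.mod_eq_emod_of_pos (by omega : (0:Int) < 10)]
    have := pvDigitSum_le (n / 10) (s + n % 10) (by omega)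
    omega
  · omega

-- termination measure lemma for the outer loop (cited by the port's decreasing_by)
theorem pvDecOuter (n : Int) (h : 10 ≤ n) : (pvDigitSum n 0).toNat < n.toNat := by
  have h1 := pvDigitSum_lt n 0 h
  have h2 := pvDigitSum_ge n 0
  omega

-- outer loop: while n>=10: n = digit_sum(n); then return n==1
def magic_number (n : Int) : Bool :=
  if h : 10 ≤ n then magic_number (pvDigitSum n 0) else n == 1
termination_by n.toNat
decreasing_by exact pvDecOuter n h

-- ===== PORT B =====
def magic_number_alt (n : Int) : Bool :=
  0 < n && PySem.Int.mod n 9 == 1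

-- ===== PRECONDITION & SPEC =====
def Spec_magic_number (n : Int) (out : Bool) : Prop := out = magic_number_alt n
instance (n : Int) (out : Bool) : Decidable (Spec_magic_number n out) := by unfold Spec_magic_number; infer_instance

-- ===== CLAIM (what is proved, stated in full; the proofs are below) =====
def Claim_equal_magic_number : Prop := ∀ (n : Int), Dom_magic_number n → Spec_magic_number n (magic_number n)

-- ===== LEMMAS AND PROOFS =====

-- digit sum preserves the value modulo 9 (10 ≡ 1 [MOD 9])
theorem pvDigitSum_mod9 (n s : Int) (hn : 0 ≤ n) :
    pvDigitSum n s % 9 = (s + n) % 9 := by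
  rw [pvDigitSum]
  split
  · rw [PySem.Int.floordiv_eq_ediv_of_pos (by omega : (0:Int) < 10),
        PySem.Int.mod_eq_emod_of_pos (by omega : (0:Int) < 10)]
    rw [pvDigitSum_mod9 (n / 10) (s + n % 10) (by omega)]
    omega
  · omega
termination_by n.toNat
decreasing_by omega

-- digit sum of a positive number is positive
theorem pvDigitSum_pos (n s : Int) (hn : 0 < n) (hs : 0 ≤ s) :
    0 < pvDigitSum n s := by
  have h1 := pvDigitSum_ge n s
  rw [pvDigitSum]
  split
  · rename_i h
    have h2 := pvDigitSum_ge (PySem.Int.floordiv n 10) (s + PySem.Int.mod n 10)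
    rw [PySem.Int.floordiv_eq_ediv_of_pos (by omega : (0:Int) < 10),
        PySem.Int.mod_eq_emod_of_pos (by omega : (0:Int) < 10)] at h2 ⊢
    by_cases hq : 0 < n / 10
    · have := pvDigitSum_pos (n / 10) (s + n % 10) hq (by omega)
      omega
    · omega
  · omega
termination_by n.toNat
decreasing_by omega

theorem magic_eq (n : Int) : magic_number n = magic_number_alt n := by
  rw [magic_number]
  split
  · rename_i h
    have h1 := pvDigitSum_lt n 0 h
    have h2 := pvDigitSum_ge n 0
    rw [magic_eq (pvDigitSum n 0)]
    have h3 := pvDigitSum_mod9 n 0 (by omega)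
    have h4 := pvDigitSum_pos n 0 (by omega) le_rfl
    have e1 : decide (0 < pvDigitSum n 0) = true := by simpa using h4
    have e2 : decide (0 < n) = true := by simp; omega
    simp only [magic_number_alt,
      PySem.Int.mod_eq_emod_of_pos (by omega : (0:Int) < 9), e1, e2,
      Bool.true_and]
    have h5 : pvDigitSum n 0 % 9 = n % 9 := by omega
    rw [h5]
  · rename_i h
    by_cases hp : 0 < n
    · interval_cases n <;> decide
    · have e1 : (n == 1) = false := by simpa using (by omega : n ≠ 1)
      have e2 : decide (0 < n) = false := by simpa using hp
      simp [magic_number_alt, e1, e2]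
termination_by n.toNat
decreasing_by exact pvDecOuter n (by assumption)

-- ===== VERDICT (by name: the statement is the Claim_ definition above) =====
theorem magic_number_spec : Claim_equal_magic_number := by
  intro n _
  exact magic_eq n
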